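-- pv_equiv track=rewrite | github.com/eternaljoyy/PracticeProblems | Code_Signal/ZigZagBookshelf.py | column_traverse
-- ===== SOURCE A (Python) =====
-- def column_traverse(matrix):
--     rows = len(matrix)
--     cols = len(matrix[0])
--     row = rows - 1 # rows = 2
--     col = cols - 1 # cols = 3
--     direction = -1  # Start going upwards
--     output = []
--
--     for _ in range(rows * cols): # 0
--         output.append(matrix[row][col]) # output: 12
--         # TODO: Implement logic to change direction and move left when hitting the top or bottom of the shelf
--
--         if direction == -1:
--             if row == 0:
--                 # change direction to going down
--                 direction = 1
--                 col -= 1 # col = 0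
--             else:
--                 row -= 1 # row = 0
--         else:
--             if row == len(matrix) - 1:
--                 # change the direction to go back up
--                 direction = -1
--                 col -= 1
--             else:
--                 row += 1 # row
--     return output
-- ===== SOURCE B (Python) =====
-- def column_traverse(matrix):
--     rows = len(matrix)
--     cols = len(matrix[0])
--     output = []
--     for i in range(cols):
--         c = cols - 1 - i
--         rs = range(rows - 1, -1, -1) if i % 2 == 0 else range(rows)
--         for r in rs:
--             output.append(matrix[r][c])
--     return output
-- ===== Notes on version B (the rewrite author's own statement) =====
-- stated objective: simpler
-- what changed: Replaced A's single flat loop with a row/col/direction state machine by explicit nested loops: columns right-to-left, inner row order (bottom-up vs top-down) chosen by column parity.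
import Mathlib
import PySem

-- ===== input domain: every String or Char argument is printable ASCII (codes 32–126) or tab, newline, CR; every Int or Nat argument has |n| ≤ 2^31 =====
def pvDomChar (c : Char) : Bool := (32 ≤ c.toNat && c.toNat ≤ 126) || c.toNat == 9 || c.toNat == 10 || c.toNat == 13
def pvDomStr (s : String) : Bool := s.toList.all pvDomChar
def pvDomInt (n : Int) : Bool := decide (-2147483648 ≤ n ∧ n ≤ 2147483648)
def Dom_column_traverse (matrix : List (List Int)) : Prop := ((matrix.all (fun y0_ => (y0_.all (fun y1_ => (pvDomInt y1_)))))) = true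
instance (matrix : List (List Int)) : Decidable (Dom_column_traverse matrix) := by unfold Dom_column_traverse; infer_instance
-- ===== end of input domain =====

-- B replaces A's flat loop + direction/row/col state machine by nested loops over
-- columns (right to left) whose inner row order is chosen by column parity; same cost.

-- ===== PORT A =====
-- read matrix[row][col]; inside Pre_ every such access is in range, so getD's default is never used
def pvCellA (matrix : List (List Int)) (row col : Int) : Int :=
  PySem.List.pyGetD (PySem.List.pyGetD matrix row []) col 0

-- the 'for _ in range(rows*cols)' loop of A, fuel = remaining iterations, state (row, col, direction, output)
def pvALoop (matrix : List (List Int)) : Nat → Int → Int → Int → List Int → List Int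
  | 0, _, _, _, output => output
  | n + 1, row, col, dir, output =>
    let output := output ++ [pvCellA matrix row col]
    if dir = -1 then
      if row = 0 then pvALoop matrix n row (col - 1) 1 output
      else pvALoop matrix n (row - 1) col dir output
    else
      if row = (matrix.length : Int) - 1 then pvALoop matrix n row (col - 1) (-1) output
      else pvALoop matrix n (row + 1) col dir output

def column_traverse (matrix : List (List Int)) : List Int :=
  let rows := matrix.length
  let cols := (PySem.List.pyGetD matrix 0 []).length
  pvALoop matrix (rows * cols) ((rows : Int) - 1) ((cols : Int) - 1) (-1) []

-- ===== PORT B =====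
def column_traverse_alt (matrix : List (List Int)) : List Int :=
  let rows := matrix.length
  let cols := (PySem.List.pyGetD matrix 0 []).length
  (List.range cols).foldl
    (fun output i =>
      let c : Int := (cols : Int) - 1 - Int.ofNat i
      let rs := if i % 2 = 0 then (List.range rows).reverse else List.range rows
      rs.foldl (fun output r => output ++ [pvCellA matrix (Int.ofNat r) c]) output)
    []

-- ===== PRECONDITION & SPEC =====
-- Pre_ excludes exactly the inputs where the Python A raises IndexError: the empty
-- matrix (matrix[0]) and ragged matrices with a row shorter than the first row.
def Pre_column_traverse (matrix : List (List Int)) : Prop :=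
  matrix ≠ [] ∧ ∀ r ∈ matrix, (matrix.headD []).length ≤ r.length
instance (matrix : List (List Int)) : Decidable (Pre_column_traverse matrix) := by
  unfold Pre_column_traverse; infer_instance

def pvWitness_column_traverse : List (List Int) := [[1, 2, 3], [4, 5, 6]]

def Spec_column_traverse (matrix : List (List Int)) (out : List Int) : Prop := out = column_traverse_alt matrix
instance (matrix : List (List Int)) (out : List Int) : Decidable (Spec_column_traverse matrix out) := by unfold Spec_column_traverse; infer_instance

-- ===== CLAIM (what is proved, stated in full; the proofs are below) =====
def Claim_equal_column_traverse : Prop := ∀ (matrix : List (List Int)), Dom_column_traverse matrix → Pre_column_traverse matrix → Spec_column_traverse matrix (column_traverse matrix)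

-- ===== LEMMAS AND PROOFS =====

-- the zigzag output, one column at a time: k columns remaining, current column c,
-- p = true means traverse this column bottom-up
def pvChunk (matrix : List (List Int)) : Nat → Int → Bool → List Int
  | 0, _, _ => []
  | k + 1, c, p =>
    ((if p then (List.range matrix.length).reverse else List.range matrix.length).map
      (fun r => pvCellA matrix (Int.ofNat r) c)) ++ pvChunk matrix k (c - 1) (!p)

-- one step of A's loop (definitional)
theorem pvALoop_step (matrix : List (List Int)) (n : Nat) (row col dir : Int) (output : List Int) :
    pvALoop matrix (n + 1) row col dir output =
      (if dir = -1 then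
        if row = 0 then pvALoop matrix n row (col - 1) 1 (output ++ [pvCellA matrix row col])
        else pvALoop matrix n (row - 1) col dir (output ++ [pvCellA matrix row col])
      else
        if row = (matrix.length : Int) - 1 then
          pvALoop matrix n row (col - 1) (-1) (output ++ [pvCellA matrix row col])
        else pvALoop matrix n (row + 1) col dir (output ++ [pvCellA matrix row col])) := rfl

-- peeling the last element off a reversed range
theorem pvMapRangeRev (f : Nat → Int) (j : Nat) :
    (List.range (j + 1 + 1)).reverse.map f = f (j + 1) :: (List.range (j + 1)).reverse.map f := by
  rw [List.range_succ]; simp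

-- peeling the first element off a shifted range
theorem pvMapRangeShift (f : Nat → Int) (j s : Nat) :
    (List.range (j + 1)).map (fun t => f (s + t)) =
      f s :: (List.range j).map (fun t => f ((s + 1) + t)) := by
  rw [List.range_succ_eq_map]
  simp only [List.map_cons, List.map_map, Nat.add_zero]
  refine congrArg _ (List.map_congr_left ?_)
  intro a _
  simp only [Function.comp_apply]
  congr 1
  omega

-- A's loop sweeping upwards from row j to row 0, then flipping
theorem pvALoop_up (matrix : List (List Int)) (j : Nat)
    (n : Nat) (c : Int) (acc : List Int) :
    pvALoop matrix (n + (j + 1)) (Int.ofNat j) c (-1) acc =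
      pvALoop matrix n 0 (c - 1) 1
        (acc ++ (List.range (j + 1)).reverse.map (fun r => pvCellA matrix (Int.ofNat r) c)) := by
  induction j generalizing acc with
  | zero => simp [pvALoop]
  | succ j ih =>
    rw [show n + (j + 1 + 1) = (n + (j + 1)) + 1 from rfl, pvALoop_step]
    have hne : ¬ ((Int.ofNat (j + 1)) = 0) := by
      simp only [Int.ofNat_eq_natCast]; omega
    rw [if_pos rfl, if_neg hne,
      show (Int.ofNat (j + 1)) - 1 = Int.ofNat j by
        simp only [Int.ofNat_eq_natCast]; push_cast; ring, ih]
    rw [pvMapRangeRev (fun r => pvCellA matrix (Int.ofNat r) c) j]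
    simp [List.append_assoc]

-- A's loop sweeping downwards from row s to the bottom row, then flipping
theorem pvALoop_down (matrix : List (List Int)) (j : Nat) :
    ∀ (s : Nat), s + j + 1 = matrix.length → ∀ (n : Nat) (c : Int) (acc : List Int),
    pvALoop matrix (n + (j + 1)) (Int.ofNat s) c 1 acc =
      pvALoop matrix n ((matrix.length : Int) - 1) (c - 1) (-1)
        (acc ++ (List.range (j + 1)).map (fun t => pvCellA matrix (Int.ofNat (s + t)) c)) := by
  induction j with
  | zero =>
    intro s hs n c acc
    have h1 : (Int.ofNat s) = (matrix.length : Int) - 1 := by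
      simp only [Int.ofNat_eq_natCast]; omega
    rw [show n + (0 + 1) = n + 1 from rfl, pvALoop_step]
    rw [if_neg (by decide : ¬ ((1 : Int) = -1)), if_pos h1, h1]
    simp [← h1]
  | succ j ih =>
    intro s hs n c acc
    rw [show n + (j + 1 + 1) = (n + (j + 1)) + 1 from rfl, pvALoop_step]
    have hne : ¬ ((Int.ofNat s) = (matrix.length : Int) - 1) := by
      simp only [Int.ofNat_eq_natCast]; omega
    rw [if_neg (by decide : ¬ ((1 : Int) = -1)), if_neg hne,
      show (Int.ofNat s) + 1 = Int.ofNat (s + 1) by simp, ih (s + 1) (by omega)]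
    rw [pvMapRangeShift (fun u => pvCellA matrix (Int.ofNat u) c) (j + 1) s]
    simp [List.append_assoc]

-- A's loop, column by column, equals the chunked zigzag
theorem pvALoop_chunk (matrix : List (List Int)) (hR : matrix.length ≠ 0) (k : Nat) :
    ∀ (c : Int) (p : Bool) (acc : List Int),
    pvALoop matrix (matrix.length * k)
      (if p then (matrix.length : Int) - 1 else 0) c (if p then -1 else 1) acc =
      acc ++ pvChunk matrix k c p := by
  induction k with
  | zero => intro c p acc; simp [pvALoop, pvChunk]
  | succ k ih =>
    intro c p acc
    have hmul : matrix.length * (k + 1) = matrix.length * k + ((matrix.length - 1) + 1) := by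
      rw [show matrix.length - 1 + 1 = matrix.length from by omega, Nat.mul_succ]
    cases p with
    | true =>
      simp only [if_true]
      have hcast : ((matrix.length : Int) - 1) = Int.ofNat (matrix.length - 1) := by
        simp only [Int.ofNat_eq_natCast]; omega
      rw [hmul, hcast, pvALoop_up matrix (matrix.length - 1)]
      have := ih (c - 1) false
      simp only [Bool.false_eq_true, if_false] at this
      rw [this]
      rw [show matrix.length - 1 + 1 = matrix.length from by omega]
      simp [pvChunk]
    | false =>
      simp only [Bool.false_eq_true, if_false]
      rw [hmul, show ((0 : Int) = Int.ofNat 0) from rfl,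
        pvALoop_down matrix (matrix.length - 1) 0 (by omega)]
      have := ih (c - 1) true
      simp only [if_true] at this
      rw [this]
      rw [show matrix.length - 1 + 1 = matrix.length from by omega]
      simp [pvChunk]

-- B's inner loop: appending one element at a time equals appending the mapped list
theorem pvFoldl_append (f : Nat → Int) (l : List Nat) :
    ∀ (acc : List Int), l.foldl (fun o r => o ++ [f r]) acc = acc ++ l.map f := by
  induction l with
  | nil => simp
  | cons x xs ih => intro acc; simp [List.foldl, ih]

-- B's outer loop, offset by the number of columns already emitted, equals the chunked zigzag
theorem pvBfold_chunk (matrix : List (List Int)) (C : Nat) (k : Nat) :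
    ∀ (off : Nat) (acc : List Int),
    (List.range k).foldl
      (fun output i =>
        let c : Int := (C : Int) - 1 - ((off + i : Nat) : Int)
        let rs := if (off + i) % 2 = 0 then (List.range matrix.length).reverse
                  else List.range matrix.length
        rs.foldl (fun o r => o ++ [pvCellA matrix (Int.ofNat r) c]) output) acc =
      acc ++ pvChunk matrix k ((C : Int) - 1 - (off : Int)) (off % 2 = 0) := by
  induction k with
  | zero => intro off acc; simp [pvChunk]
  | succ k ih =>
    intro off acc
    rw [List.range_succ_eq_map, List.foldl_cons, List.foldl_map]
    simp only [Nat.add_zero]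
    rw [pvFoldl_append]
    have hshift :
        (List.range k).foldl
          (fun output i =>
            let c : Int := (C : Int) - 1 - ((off + (i + 1) : Nat) : Int)
            let rs := if (off + (i + 1)) % 2 = 0 then (List.range matrix.length).reverse
                      else List.range matrix.length
            rs.foldl (fun o r => o ++ [pvCellA matrix (Int.ofNat r) c]) output)
          (acc ++ (if off % 2 = 0 then (List.range matrix.length).reverse
                   else List.range matrix.length).map
              (fun r => pvCellA matrix (Int.ofNat r) ((C : Int) - 1 - (off : Int)))) =
        (List.range k).foldl
          (fun output i =>
            let c : Int := (C : Int) - 1 - (((off + 1) + i : Nat) : Int)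
            let rs := if ((off + 1) + i) % 2 = 0 then (List.range matrix.length).reverse
                      else List.range matrix.length
            rs.foldl (fun o r => o ++ [pvCellA matrix (Int.ofNat r) c]) output)
          (acc ++ (if off % 2 = 0 then (List.range matrix.length).reverse
                   else List.range matrix.length).map
              (fun r => pvCellA matrix (Int.ofNat r) ((C : Int) - 1 - (off : Int)))) := by
      apply PySem.List.foldl_congr_mem
      intro o i _
      have : off + (i + 1) = (off + 1) + i := by omega
      rw [this]
    rw [hshift, ih (off + 1)]
    have hparb : (decide ((off + 1) % 2 = 0)) = ! (decide (off % 2 = 0)) := by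
      by_cases h : off % 2 = 0
      · simp [h]; omega
      · simp [h]; omega
    have hc : (C : Int) - 1 - ((off + 1 : Nat) : Int) = ((C : Int) - 1 - (off : Int)) - 1 := by
      push_cast; ring
    conv_rhs => rw [show (pvChunk matrix (k + 1) ((C : Int) - 1 - (off : Int)) (off % 2 = 0)) =
      ((if (decide (off % 2 = 0)) = true then (List.range matrix.length).reverse
        else List.range matrix.length).map
          (fun r => pvCellA matrix (Int.ofNat r) ((C : Int) - 1 - (off : Int)))) ++
        pvChunk matrix k (((C : Int) - 1 - (off : Int)) - 1) (! (decide (off % 2 = 0))) from rfl]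
    rw [hc, hparb]
    simp [List.append_assoc]

-- ===== VERDICT (by name: the statement is the Claim_ definition above) =====
theorem column_traverse_spec : Claim_equal_column_traverse := by
  intro matrix _ hpre
  unfold Spec_column_traverse column_traverse column_traverse_alt
  have hR : matrix.length ≠ 0 := by
    intro h; exact hpre.1 (List.eq_nil_of_length_eq_zero h)
  set C := (PySem.List.pyGetD matrix 0 []).length with hC
  have hA := pvALoop_chunk matrix hR C ((C : Int) - 1) true []
  simp only [if_true] at hA
  have hB := pvBfold_chunk matrix C C 0 []
  simp only [Nat.zero_add, Nat.zero_mod, Int.natCast_zero, sub_zero, decide_true] at hB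
  refine hA.trans ?_
  rw [← hB]
  apply PySem.List.foldl_congr_mem
  intro acc x _
  rfl
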